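-- pv_equiv track=rewrite | github.com/fitz-s/zeus | scripts/healthcheck.py | _is_known_live_db_holder
-- ===== SOURCE A (Python) =====
-- def _has_module_launch(command: str, module: str) -> bool:
--     tokens = str(command or "").split()
--     for idx, token in enumerate(tokens[:-1]):
--         if token == "-m" and tokens[idx + 1] == module:
--             return True
--     return False
--
-- def _is_known_live_db_holder(command: str) -> bool:
--     command = str(command or "")
--     known_modules = (
--         "src.main",
--         "src.riskguard.riskguard",
--     )
--     if any(_has_module_launch(command, module) for module in known_modules):
--         return True
--     return False
-- ===== SOURCE B (Python) =====
-- def _is_known_live_db_holder(command: str) -> bool: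
--     tokens = str(command or "").split()
--     launched = set()
--     prev = None
--     for tok in tokens:
--         if prev == "-m":
--             launched.add(tok)
--         prev = tok
--     return bool(launched & {"src.main", "src.riskguard.riskguard"})
-- ===== Notes on version B (the rewrite author's own statement) =====
-- stated objective: simpler
-- what changed: One previous-token pass over the tokens collects every module launched with -m into a set, then a single set intersection with the known modules replaces A's per-module helper with its enumerate/index inner scan.
import Mathlib
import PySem

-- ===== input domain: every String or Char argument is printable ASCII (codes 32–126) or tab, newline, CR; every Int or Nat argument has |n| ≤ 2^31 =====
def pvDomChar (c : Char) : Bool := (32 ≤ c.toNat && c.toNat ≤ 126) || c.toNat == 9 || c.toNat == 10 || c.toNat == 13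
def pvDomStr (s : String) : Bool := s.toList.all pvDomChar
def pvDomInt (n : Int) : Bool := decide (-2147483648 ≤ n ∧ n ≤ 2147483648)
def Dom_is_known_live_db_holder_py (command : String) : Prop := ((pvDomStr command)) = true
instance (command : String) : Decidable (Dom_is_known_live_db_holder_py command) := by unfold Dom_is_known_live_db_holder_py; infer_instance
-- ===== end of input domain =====

-- B replaces A's per-module scans by one previous-token pass building the set of launched
-- modules, then a set intersection with the two known modules (objective: simpler).

-- ===== PORT A =====
-- loop 'for idx, token in enumerate(tokens[:-1]): if token == "-m" and tokens[idx+1] == module: return True'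
-- tokens[idx+1] is always in range here, so 'pyGet? … == some module' is exact.
def has_module_launch_go (tokens : List String) (module : String) : List (Int × String) → Bool
  | [] => false
  | (idx, token) :: rest =>
      if token == "-m" && (PySem.List.pyGet? tokens (idx + 1) == some module) then true
      else has_module_launch_go tokens module rest

def has_module_launch (command module : String) : Bool :=
  let command := if command == "" then "" else command   -- str(command or "")
  let tokens := PySem.Str.split₀ command
  has_module_launch_go tokens module
    (PySem.List.enumerate (PySem.List.slice tokens none (some (-1))) 0)

def is_known_live_db_holder_py (command : String) : Bool :=
  let command := if command == "" then "" else command   -- str(command or "")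
  if ["src.main", "src.riskguard.riskguard"].any (fun module => has_module_launch command module)
  then true else false

-- ===== PORT B =====
-- one pass: state (launched set, previous token); then bool(launched & known)
def is_known_live_db_holder_py_alt (command : String) : Bool :=
  let command := if command == "" then "" else command   -- str(command or "")
  let tokens := PySem.Str.split₀ command
  let st := tokens.foldl
    (fun (st : PySem.Set String × Option String) tok =>
      ((if st.2 == some "-m" then PySem.Set.add st.1 tok else st.1), some tok))
    (PySem.Set.empty, none)
  !(PySem.Set.inter st.1 (PySem.Set.ofList ["src.main", "src.riskguard.riskguard"])).isEmpty

-- ===== PRECONDITION & SPEC =====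
def Spec_is_known_live_db_holder_py (command : String) (out : Bool) : Prop := out = is_known_live_db_holder_py_alt command
instance (command : String) (out : Bool) : Decidable (Spec_is_known_live_db_holder_py command out) := by unfold Spec_is_known_live_db_holder_py; infer_instance

-- ===== CLAIM (what is proved, stated in full; the proofs are below) =====
def Claim_equal_is_known_live_db_holder_py : Prop := ∀ (command : String), Dom_is_known_live_db_holder_py command → Spec_is_known_live_db_holder_py command (is_known_live_db_holder_py command)

-- ===== LEMMAS AND PROOFS =====

-- common characterisation: some adjacent pair of tokens is ("-m", module)
def mentioned (module : String) : List String → Bool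
  | x :: y :: rest => (x == "-m" && y == module) || mentioned module (y :: rest)
  | _ => false

-- the modules collected by B's pass, given the previous token
def coll (prev : Option String) : List String → List String
  | [] => []
  | t :: rest => (if prev == some "-m" then [t] else []) ++ coll (some t) rest

theorem mem_coll_some (x p : String) (l : List String) :
    x ∈ coll (some p) l ↔ mentioned x (p :: l) = true := by
  induction l generalizing p with
  | nil => simp [coll, mentioned]
  | cons t rest ih =>
      simp only [coll, List.mem_append, ih t, mentioned, Bool.or_eq_true, Bool.and_eq_true, beq_iff_eq]
      constructor
      · rintro (h | h)
        · split at h <;> simp_all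
        · exact Or.inr h
      · rintro (⟨hp, ht⟩ | h)
        · subst hp ht; simp
        · exact Or.inr h

theorem mem_coll_none (x : String) (l : List String) :
    x ∈ coll none l ↔ mentioned x l = true := by
  cases l with
  | nil => simp [coll, mentioned]
  | cons t rest => simpa [coll] using mem_coll_some x t rest

-- B's foldl state: first component is Set.update of the collected modules
theorem foldl_fst (l : List String) (s : PySem.Set String) (prev : Option String) :
    (l.foldl (fun (st : PySem.Set String × Option String) tok =>
        ((if st.2 == some "-m" then PySem.Set.add st.1 tok else st.1), some tok))
      (s, prev)).1 = PySem.Set.update s (coll prev l) := by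
  induction l generalizing s prev with
  | nil => simp [coll, PySem.Set.update]
  | cons t rest ih =>
      simp only [List.foldl_cons, ih, coll]
      by_cases h : prev = some "-m" <;> simp [h, PySem.Set.update]

theorem mem_launched (tokens : List String) (x : String) :
    x ∈ (tokens.foldl (fun (st : PySem.Set String × Option String) tok =>
        ((if st.2 == some "-m" then PySem.Set.add st.1 tok else st.1), some tok))
      (PySem.Set.empty, none)).1 ↔ mentioned x tokens = true := by
  rw [foldl_fst, ← mem_coll_none]
  simp [PySem.Set.mem_update, PySem.Set.empty]

-- A's inner loop, generalized over the start index
theorem go_drop (tokens : List String) (module : String) (k : Nat) :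
    has_module_launch_go tokens module (PySem.List.enumerate (tokens.dropLast.drop k) (k : Int))
      = mentioned module (tokens.drop k) := by
  by_cases hk : k + 1 < tokens.length
  · have hk0 : k < tokens.dropLast.length := by simp [List.length_dropLast]; omega
    have h1 : tokens.dropLast.drop k = tokens.dropLast[k] :: tokens.dropLast.drop (k + 1) :=
      (List.getElem_cons_drop hk0).symm
    have h2 : tokens.drop k = tokens[k] :: tokens.drop (k + 1) :=
      (List.getElem_cons_drop (by omega)).symm
    have h3 : tokens.drop (k + 1) = tokens[k + 1] :: tokens.drop (k + 2) :=
      (List.getElem_cons_drop hk).symm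
    have hdl : tokens.dropLast[k] = tokens[k] := by simp
    have hget : PySem.List.pyGet? tokens ((k : Int) + 1) = some tokens[k + 1] := by
      have := PySem.List.pyGet?_natCast tokens (k + 1)
      push_cast at this
      simp [this, List.getElem?_eq_getElem hk]
    rw [h1, PySem.List.enumerate_cons, h2]
    simp only [has_module_launch_go, hdl, hget]
    have ih := go_drop tokens module (k + 1)
    push_cast at ih ⊢
    rw [ih, h3]
    simp only [mentioned]
    by_cases h : tokens[k] = "-m" <;> by_cases h' : tokens[k + 1] = module <;>
      simp [h, h', ← h3]
  · have h1 : tokens.dropLast.drop k = [] := by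
      apply List.drop_eq_nil_of_le; simp [List.length_dropLast]; omega
    rw [h1]
    cases h2 : tokens.drop k with
    | nil => simp [PySem.List.enumerate, has_module_launch_go, mentioned]
    | cons a rest =>
        have : rest = [] := by
          have := congrArg List.length h2
          simp at this
          cases rest with
          | nil => rfl
          | cons b bs => exfalso; simp at this; omega
        subst this
        simp [PySem.List.enumerate, has_module_launch_go, mentioned]
termination_by tokens.length - k

theorem has_module_launch_eq (command module : String) :
    has_module_launch command module
      = mentioned module (PySem.Str.split₀ (if command == "" then "" else command)) := by
  unfold has_module_launch
  have h := go_drop (PySem.Str.split₀ (if command == "" then "" else command)) module 0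
  simpa [PySem.List.slice_to_neg_one] using h

-- ===== VERDICT (by name: the statement is the Claim_ definition above) =====
theorem is_known_live_db_holder_py_spec : Claim_equal_is_known_live_db_holder_py := by
  intro command _
  unfold Spec_is_known_live_db_holder_py is_known_live_db_holder_py is_known_live_db_holder_py_alt
  simp only [has_module_launch_eq]
  by_cases hc : command = ""
  · subst hc; decide
  · have hc' : (command == "") = false := by simp [hc]
    simp only [hc', Bool.false_eq_true, if_false]
    have hif : ∀ b : Bool, (if b = true then true else false) = b := by decide
    rw [hif, Bool.eq_iff_iff, List.any_eq_true]
    set tokens := PySem.Str.split₀ command with htok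
    have key : ∀ x : String,
        x ∈ PySem.Set.inter (tokens.foldl (fun (st : PySem.Set String × Option String) tok =>
            ((if st.2 == some "-m" then PySem.Set.add st.1 tok else st.1), some tok))
          (PySem.Set.empty, none)).1 (PySem.Set.ofList ["src.main", "src.riskguard.riskguard"]) ↔
          x ∈ ["src.main", "src.riskguard.riskguard"] ∧ mentioned x tokens = true := by
      intro x
      rw [PySem.Set.mem_inter, mem_launched, PySem.Set.mem_ofList]
      tauto
    constructor
    · rintro ⟨m, hm, hmen⟩
      rw [Bool.not_eq_true', List.isEmpty_eq_false_iff_exists_mem]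
      exact ⟨m, (key m).2 ⟨hm, hmen⟩⟩
    · intro h
      rw [Bool.not_eq_true', List.isEmpty_eq_false_iff_exists_mem] at h
      obtain ⟨m, hm⟩ := h
      obtain ⟨h1, h2⟩ := (key m).1 hm
      exact ⟨m, h1, h2⟩
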